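-- pv_equiv track=rewrite | github.com/rogeriosilva-ifpi/ifpi-ads-2025.1-algoritmos | API_19maio2025_Ate_WHILE/savyo_api/q1_nome.py | calculo_com_nome
-- ===== SOURCE A (Python) =====
-- def calculo_com_nome(nome: str) -> list[int]:
--     comprimento_nome = len(nome)
--     if comprimento_nome % 2 != 0:
--         divisores = []
--         possivel_divisor = comprimento_nome
--         while possivel_divisor > 0 :
--             if comprimento_nome % possivel_divisor == 0:
--                 divisores.append(possivel_divisor)
--             possivel_divisor -= 1
--         return divisores
--     else:
--         multiplo = 1
--         multiplos = []
--         while multiplo <= comprimento_nome: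
--             multiplos.append(multiplo * comprimento_nome)
--             multiplo += 1
--         return multiplos
-- ===== SOURCE B (Python) =====
-- def calculo_com_nome(nome: str) -> list[int]:
--     n = len(nome)
--     if n % 2 != 0:
--         divisores = set()
--         i = 1
--         while i * i <= n:
--             if n % i == 0:
--                 divisores.add(i)
--                 divisores.add(n // i)
--             i += 1
--         return sorted(divisores, reverse=True)
--     else:
--         return [i * n for i in range(1, n + 1)]
-- ===== Notes on version B (the rewrite author's own statement) =====
-- stated objective: faster
-- what changed: For odd name lengths, B collects divisor pairs (i, n//i) for i up to sqrt(n) into a set and sorts it descending instead of A's full downward trial-division scan over all n candidates; the even branch becomes a range comprehension.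
import Mathlib
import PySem

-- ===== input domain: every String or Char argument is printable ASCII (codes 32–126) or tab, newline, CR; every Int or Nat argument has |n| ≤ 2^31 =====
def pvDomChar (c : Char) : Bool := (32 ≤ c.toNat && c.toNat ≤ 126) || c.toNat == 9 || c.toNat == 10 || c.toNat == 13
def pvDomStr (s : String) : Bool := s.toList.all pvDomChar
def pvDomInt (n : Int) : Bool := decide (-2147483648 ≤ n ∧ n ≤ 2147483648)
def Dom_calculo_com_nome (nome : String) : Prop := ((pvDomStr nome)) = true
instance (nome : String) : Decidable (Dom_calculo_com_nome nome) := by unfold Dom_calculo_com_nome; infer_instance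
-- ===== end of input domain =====

-- B replaces A's full downward trial-division scan (odd lengths) by a √n pair-collecting scan
-- into a set followed by a descending sort, and the even-branch loop by a comprehension.

-- ===== PORT A =====
-- 'while possivel_divisor > 0: if n % possivel_divisor == 0: append; decrement' — d counts down
def pvADivs (n : Nat) : Nat → List Int
  | 0 => []
  | d + 1 => (if n % (d + 1) == 0 then [((d : Int) + 1)] else []) ++ pvADivs n d

-- 'while multiplo <= n: append(multiplo * n); increment' (fuel ≥ n + 1 - m only makes it total)
def pvAMults (n : Nat) : Nat → Nat → List Int
  | 0, _ => []
  | fuel + 1, m => if m ≤ n then ((m * n : Nat) : Int) :: pvAMults n fuel (m + 1) else []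

def calculo_com_nome (nome : String) : List Int :=
  let comprimento := nome.toList.length  -- len(nome): number of characters, exact on ASCII
  if comprimento % 2 ≠ 0 then pvADivs comprimento comprimento
  else pvAMults comprimento (comprimento + 1) 1

-- ===== PORT B =====
-- 'while i*i <= n: if n % i == 0: divisores.add(i); divisores.add(n // i); i += 1'
-- (fuel ≥ n + 2 - i only makes it total: the loop runs at most n + 1 times from i = 1)
def pvBCollect (n : Nat) : Nat → Nat → PySem.Set Int → PySem.Set Int
  | 0, _, s => s
  | fuel + 1, i, s =>
    if i * i ≤ n then
      pvBCollect n fuel (i + 1)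
        (if n % i == 0 then PySem.Set.add (PySem.Set.add s (i : Int)) ((n / i : Nat) : Int) else s)
    else s

def calculo_com_nome_alt (nome : String) : List Int :=
  let n := nome.toList.length  -- len(nome): number of characters, exact on ASCII
  if n % 2 ≠ 0 then
    PySem.List.sorted (pvBCollect n (n + 2) 1 PySem.Set.empty) (fun x => x) true
  else
    (PySem.List.pyRange 1 ((n : Int) + 1) 1).map (fun i => i * (n : Int))

-- ===== PRECONDITION & SPEC =====
def Spec_calculo_com_nome (nome : String) (out : List Int) : Prop := out = calculo_com_nome_alt nome
instance (nome : String) (out : List Int) : Decidable (Spec_calculo_com_nome nome out) := by unfold Spec_calculo_com_nome; infer_instance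

-- ===== CLAIM (what is proved, stated in full; the proofs are below) =====
def Claim_equal_calculo_com_nome : Prop := ∀ (nome : String), Dom_calculo_com_nome nome → Spec_calculo_com_nome nome (calculo_com_nome nome)

-- ===== LEMMAS AND PROOFS =====

-- even branch: A's upward multiples loop is B's comprehension over range(1, n+1)
lemma pvAMults_eq_aux (n : Nat) : ∀ (k m : Nat), n + 1 - m ≤ k →
    pvAMults n k m = (PySem.List.pyRange (m : Int) ((n : Int) + 1) 1).map (fun i => i * (n : Int)) := by
  intro k
  induction k with
  | zero =>
    intro m hm
    rw [pvAMults, PySem.List.pyRange_one_eq_nil (by omega)]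
    simp
  | succ k ih =>
    intro m hm
    by_cases h : m ≤ n
    · rw [pvAMults, if_pos h, ih (m + 1) (by omega),
        PySem.List.pyRange_one_cons (show (m : Int) < (n : Int) + 1 by omega), List.map_cons]
      push_cast
      simp
    · rw [pvAMults, if_neg h, PySem.List.pyRange_one_eq_nil (by omega)]
      simp

lemma mem_pvADivs (n d : Nat) (x : Int) :
    x ∈ pvADivs n d ↔ ∃ k : Nat, 1 ≤ k ∧ k ≤ d ∧ n % k = 0 ∧ x = (k : Int) := by
  induction d with
  | zero =>
    simp only [pvADivs, List.not_mem_nil, false_iff]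
    rintro ⟨k, h1, h2, -, -⟩
    omega
  | succ d ih =>
    simp only [pvADivs, List.mem_append, ih]
    constructor
    · rintro (h | ⟨k, h1, h2, h3, h4⟩)
      · split at h
        · rename_i hd
          simp only [beq_iff_eq] at hd
          simp only [List.mem_singleton] at h
          exact ⟨d + 1, by omega, by omega, hd, by push_cast [h]; ring⟩
        · simp at h
      · exact ⟨k, h1, by omega, h3, h4⟩
    · rintro ⟨k, h1, h2, h3, h4⟩
      rcases Nat.lt_or_ge k (d + 1) with hk | hk
      · exact Or.inr ⟨k, h1, by omega, h3, h4⟩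
      · have hkd : k = d + 1 := by omega
        subst hkd
        left
        simp only [h3, beq_self_eq_true, if_pos, List.mem_singleton]
        push_cast [h4]
        ring

lemma pvADivs_pairwise (n d : Nat) : (pvADivs n d).Pairwise (fun a b => b < a) := by
  induction d with
  | zero => simp [pvADivs]
  | succ d ih =>
    rw [pvADivs, List.pairwise_append]
    refine ⟨by split <;> simp, ih, ?_⟩
    intro a ha b hb
    rw [mem_pvADivs] at hb
    obtain ⟨k, hk1, hk2, _, hk4⟩ := hb
    split at ha <;> simp at ha
    subst ha hk4
    omega

lemma pvBCollect_guard_false (n i : Nat) (hni : n + 2 ≤ i) : ¬ i * i ≤ n := by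
  have : i ≤ i * i := Nat.le_mul_of_pos_left i (by omega)
  omega

lemma nodup_pvBCollect_aux (n : Nat) : ∀ (k i : Nat) (s : PySem.Set Int),
    s.Nodup → (pvBCollect n k i s).Nodup := by
  intro k
  induction k with
  | zero =>
    intro i s hs
    exact hs
  | succ k ih =>
    intro i s hs
    rw [pvBCollect]
    split
    · apply ih (i + 1)
      split
      · exact PySem.Set.nodup_add _ _ (PySem.Set.nodup_add _ _ hs)
      · exact hs
    · exact hs

lemma mem_pvBCollect_aux (n : Nat) : ∀ (k i : Nat) (s : PySem.Set Int) (x : Int),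
    n + 2 - i ≤ k →
    (x ∈ pvBCollect n k i s ↔
      x ∈ s ∨ ∃ j : Nat, i ≤ j ∧ j * j ≤ n ∧ n % j = 0 ∧ (x = (j : Int) ∨ x = ((n / j : Nat) : Int))) := by
  intro k
  induction k with
  | zero =>
    intro i s x hk
    rw [pvBCollect]
    constructor
    · exact Or.inl
    · rintro (hx | ⟨j, hj1, hj2, _, _⟩)
      · exact hx
      · exfalso
        exact pvBCollect_guard_false n i (by omega) (le_trans (Nat.mul_le_mul hj1 hj1) hj2)
  | succ k ih =>
    intro i s x hk
    rw [pvBCollect]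
    split
    · rename_i hguard
      rw [ih (i + 1) _ x (by omega)]
      constructor
      · rintro (hx | ⟨j, hj1, hj2, hj3, hj4⟩)
        · split at hx
          · rename_i hdiv
            simp only [beq_iff_eq] at hdiv
            rw [PySem.Set.mem_add, PySem.Set.mem_add] at hx
            rcases hx with (hx | hx) | hx
            · exact Or.inl hx
            · exact Or.inr ⟨i, le_refl i, hguard, hdiv, Or.inl hx⟩
            · exact Or.inr ⟨i, le_refl i, hguard, hdiv, Or.inr hx⟩
          · exact Or.inl hx
        · exact Or.inr ⟨j, by omega, hj2, hj3, hj4⟩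
      · rintro (hx | ⟨j, hj1, hj2, hj3, hj4⟩)
        · left
          split
          · rw [PySem.Set.mem_add, PySem.Set.mem_add]
            exact Or.inl (Or.inl hx)
          · exact hx
        · rcases Nat.lt_or_ge i j with hij | hij
          · exact Or.inr ⟨j, by omega, hj2, hj3, hj4⟩
          · have hji : j = i := by omega
            subst hji
            left
            have hdiv : (n % j == 0) = true := by simp [hj3]
            rw [if_pos hdiv, PySem.Set.mem_add, PySem.Set.mem_add]
            tauto
    · rename_i hguard
      constructor
      · exact Or.inl
      · rintro (hx | ⟨j, hj1, hj2, _, _⟩)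
        · exact hx
        · exact absurd (le_trans (Nat.mul_le_mul hj1 hj1) hj2) hguard

-- divisor pairing: the pairs (j, n/j) for j ≤ √n are exactly all divisors of n (n ≥ 1)
lemma pairing (n : Nat) (hn : 1 ≤ n) (x : Int) :
    (∃ j : Nat, 1 ≤ j ∧ j * j ≤ n ∧ n % j = 0 ∧ (x = (j : Int) ∨ x = ((n / j : Nat) : Int))) ↔
      ∃ k : Nat, 1 ≤ k ∧ k ≤ n ∧ n % k = 0 ∧ x = (k : Int) := by
  constructor
  · rintro ⟨j, hj1, hj2, hj3, hj4⟩
    have hjd : j ∣ n := Nat.dvd_of_mod_eq_zero hj3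
    have hjn : j ≤ n := Nat.le_of_dvd (by omega) hjd
    rcases hj4 with h | h
    · exact ⟨j, hj1, hjn, hj3, h⟩
    · exact ⟨n / j, Nat.div_pos hjn (by omega), Nat.div_le_self n j,
        Nat.mod_eq_zero_of_dvd (Nat.div_dvd_of_dvd hjd), h⟩
  · rintro ⟨k, hk1, hk2, hk3, hk4⟩
    have hkd : k ∣ n := Nat.dvd_of_mod_eq_zero hk3
    rcases Nat.lt_or_ge n (k * k) with h | h
    · refine ⟨n / k, Nat.div_pos hk2 (by omega), ?_, ?_, ?_⟩
      · have hlt : n / k < k := by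
          by_contra hc
          have : k * k ≤ k * (n / k) := Nat.mul_le_mul_left k (by omega)
          rw [Nat.mul_div_cancel' hkd] at this
          omega
        calc n / k * (n / k) ≤ n / k * k := Nat.mul_le_mul_left _ (Nat.le_of_lt hlt)
          _ = n := Nat.div_mul_cancel hkd
      · exact Nat.mod_eq_zero_of_dvd (Nat.div_dvd_of_dvd hkd)
      · rw [Nat.div_div_self hkd (by omega)]
        exact Or.inr hk4
    · exact ⟨k, hk1, h, hk3, Or.inl hk4⟩

lemma odd_branch (n : Nat) (hn : n % 2 ≠ 0) :
    pvADivs n n = PySem.List.sorted (pvBCollect n (n + 2) 1 PySem.Set.empty) (fun x => x) true := by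
  have hn1 : 1 ≤ n := by omega
  have hperm : (pvADivs n n).Perm (pvBCollect n (n + 2) 1 PySem.Set.empty) := by
    rw [List.perm_ext_iff_of_nodup (pvADivs_pairwise n n).nodup
      (nodup_pvBCollect_aux n (n + 2) 1 PySem.Set.empty (by simp [PySem.Set.empty]))]
    intro x
    rw [mem_pvADivs, mem_pvBCollect_aux n (n + 2) 1 PySem.Set.empty x (by omega)]
    simp only [PySem.Set.empty, List.not_mem_nil, false_or]
    exact (pairing n hn1 x).symm
  exact (PySem.List.sorted_rev_eq_of_perm_of_pairwise_gt _ _ _ hperm (pvADivs_pairwise n n)).symm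

-- ===== VERDICT (by name: the statement is the Claim_ definition above) =====
theorem calculo_com_nome_spec : Claim_equal_calculo_com_nome := by
  intro nome _
  unfold Spec_calculo_com_nome calculo_com_nome calculo_com_nome_alt
  by_cases h : nome.toList.length % 2 = 0
  · simp only [h, ne_eq, not_true_eq_false, if_false]
    exact pvAMults_eq_aux nome.toList.length (nome.toList.length + 1) 1 (by omega)
  · simp only [h, ne_eq, not_false_eq_true, if_true]
    exact odd_branch nome.toList.length h
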